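-- pv_equiv track=rewrite | github.com/astrosander/SIDM_Transport_Theory_vs_MC | GNC/source/com/str.py | mio_spl
-- ===== SOURCE A (Python) =====
-- def mio_spl(length: int, s: str):
--     s = (s[:length]).ljust(length)
--     delimit = [[-1] * 100, [-1] * 100]
--     nsub = 0
--     j = 0
--
--     while True:
--         j += 1
--         if j > length:
--             break
--         c = s[j - 1]
--         if c == " " or c == "=":
--             continue
--         k = j
--         while True:
--             k += 1
--             if k > length:
--                 break
--             c = s[k - 1]
--             if c != " " and c != "=":
--                 continue
--             break
--         nsub += 1
--         delimit[0][nsub - 1] = j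
--         delimit[1][nsub - 1] = k - 1
--         if k < length:
--             j = k
--             continue
--         break
--
--     return nsub, delimit
-- ===== SOURCE B (Python) =====
-- def mio_spl(length: int, s: str):
--     n = max(length, 0)
--     s = (s[:n]).ljust(n)
--     delimit = [[-1] * 100, [-1] * 100]
--     nsub = 0
--     in_tok = False
--     for i, c in enumerate(s):
--         if c == " " or c == "=":
--             in_tok = False
--         elif in_tok:
--             delimit[1][nsub - 1] = i + 1
--         else:
--             delimit[0][nsub] = i + 1
--             delimit[1][nsub] = i + 1
--             nsub += 1
--             in_tok = True
--     return nsub, delimit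
-- ===== Notes on version B (the rewrite author's own statement) =====
-- stated objective: simpler
-- what changed: Replaced A's nested while-loops with manual 1-based index jumping (inner loop scans to the end of each token, outer loop restarts after it) by a single linear for-loop over enumerate(s) with one boolean in-token state flag.
import Mathlib
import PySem

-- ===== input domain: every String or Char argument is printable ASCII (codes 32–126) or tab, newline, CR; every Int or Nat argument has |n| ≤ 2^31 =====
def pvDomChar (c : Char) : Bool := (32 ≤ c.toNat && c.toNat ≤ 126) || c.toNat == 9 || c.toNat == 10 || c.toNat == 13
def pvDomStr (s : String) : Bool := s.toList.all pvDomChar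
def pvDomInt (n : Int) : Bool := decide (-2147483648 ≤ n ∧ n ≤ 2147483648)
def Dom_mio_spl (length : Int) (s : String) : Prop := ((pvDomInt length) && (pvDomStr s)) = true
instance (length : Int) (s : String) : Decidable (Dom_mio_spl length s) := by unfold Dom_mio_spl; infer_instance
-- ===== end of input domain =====

-- B is simpler: one linear scan with a boolean "inside a token" flag instead of A's
-- nested while-loops with manual 1-based index arithmetic; same return value on Pre_.

-- ===== PORT A =====
-- Python s[i] for the in-range accesses the loops perform (0 ≤ i < len(s) always holds
-- when A reads s[j-1]/s[k-1]; the ' ' default is never reached)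
def pvCharAt (cs : Array Char) (i : Int) : Char :=
  if _h : 0 ≤ i ∧ i.toNat < cs.size then cs[i.toNat] else ' '

-- inner `while True` loop of A: k += 1; stop when k > length or s[k-1] is ' '/'='
def pvInnerA (cs : Array Char) (length : Int) (k : Int) : Int :=
  let k' := k + 1
  if _h : k' > length then k'
  else
    let c := pvCharAt cs (k' - 1)
    if c ≠ ' ' ∧ c ≠ '=' then pvInnerA cs length k' else k'
termination_by (length - k).toNat
decreasing_by omega

theorem pvInnerA_gt (cs : Array Char) (length k : Int) : k < pvInnerA cs length k := by
  fun_induction pvInnerA cs length k with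
  | case1 => omega
  | case2 => omega
  | case3 _ _ _ _ ih => omega

-- outer `while True` loop of A
def pvOuterA (cs : Array Char) (length : Int) (d0 d1 : List Int) (nsub j : Int) :
    Int × List (List Int) :=
  let j' := j + 1
  if _h : j' > length then (nsub, [d0, d1])
  else
    let c := pvCharAt cs (j' - 1)
    if c = ' ' ∨ c = '=' then pvOuterA cs length d0 d1 nsub j'
    else
      let k := pvInnerA cs length j'
      let nsub' := nsub + 1
      -- delimit[0][nsub-1] = j ; delimit[1][nsub-1] = k - 1 (Python raises past index 99: outside Pre_)
      let d0' := d0.set (nsub' - 1).toNat j'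
      let d1' := d1.set (nsub' - 1).toNat (k - 1)
      if _h2 : k < length then pvOuterA cs length d0' d1' nsub' k
      else (nsub', [d0', d1'])
termination_by (length - j).toNat
decreasing_by
  · omega
  · have := pvInnerA_gt cs length (j + 1); omega

-- s = (s[:length]).ljust(length)
def pvPrepA (length : Int) (s : String) : List Char :=
  let cs0 := PySem.List.slice s.toList none (some length)
  cs0 ++ List.replicate (length - cs0.length).toNat ' '

def mio_spl (length : Int) (s : String) : Int × List (List Int) :=
  pvOuterA (pvPrepA length s).toArray length (List.replicate 100 (-1)) (List.replicate 100 (-1)) 0 0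

-- ===== PORT B =====
-- n = max(length, 0); s = (s[:n]).ljust(n)
def pvPrepB (length : Int) (s : String) : List Char :=
  let n := max length 0
  let cs0 := PySem.List.slice s.toList none (some n)
  cs0 ++ List.replicate (n - cs0.length).toNat ' '

-- the body of B's single `for i, c in enumerate(s)` loop;
-- state = (i, nsub, delimit[0], delimit[1], in_tok), the enumerate index i carried in the state
def pvStepB (st : Int × Int × List Int × List Int × Bool) (c : Char) :
    Int × Int × List Int × List Int × Bool :=
  if c = ' ' ∨ c = '=' then (st.1 + 1, st.2.1, st.2.2.1, st.2.2.2.1, false)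
  else if st.2.2.2.2 then
    (st.1 + 1, st.2.1, st.2.2.1, (st.2.2.2.1).set (st.2.1 - 1).toNat (st.1 + 1), true)
  else
    (st.1 + 1, st.2.1 + 1, (st.2.2.1).set (st.2.1).toNat (st.1 + 1),
      (st.2.2.2.1).set (st.2.1).toNat (st.1 + 1), true)

def mio_spl_alt (length : Int) (s : String) : Int × List (List Int) :=
  let cs := pvPrepB length s
  let st := cs.foldl pvStepB (0, 0, List.replicate 100 (-1), List.replicate 100 (-1), false)
  (st.2.1, [st.2.2.1, st.2.2.2.1])

-- ===== PRECONDITION & SPEC =====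
def pvDelim (c : Char) : Bool := c == ' ' || c == '='

-- number of maximal runs of non-' '/'=' characters (token starts) in the padded field
def pvStarts (cs : List Char) : Nat :=
  ((List.range cs.length).filter
    (fun i => pvDelim (cs.getD i ' ') = false ∧ (i = 0 ∨ pvDelim (cs.getD (i - 1) ' ') = true))).length

-- Pre_ excludes exactly the inputs with more than 100 tokens, where Python A (and B) raise
-- IndexError (the trailing space padding adds no token, so counting on s[:max(length,0)] is exact)
def Pre_mio_spl (length : Int) (s : String) : Prop :=
  pvStarts (s.toList.take (max length 0).toNat) ≤ 100
instance (length : Int) (s : String) : Decidable (Pre_mio_spl length s) := by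
  unfold Pre_mio_spl; infer_instance

def pvWitness_mio_spl : Int × String := (9, "ab = cd e")

def Spec_mio_spl (length : Int) (s : String) (out : Int × List (List Int)) : Prop :=
  out = mio_spl_alt length s
instance (length : Int) (s : String) (out : Int × List (List Int)) :
    Decidable (Spec_mio_spl length s out) := by unfold Spec_mio_spl; infer_instance

-- ===== CLAIM (what is proved, stated in full; the proofs are below) =====
def Claim_equal_mio_spl : Prop := ∀ (length : Int) (s : String),
  Dom_mio_spl length s → Pre_mio_spl length s → Spec_mio_spl length s (mio_spl length s)

-- ===== LEMMAS AND PROOFS =====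

-- reference tokenizer: list of (0-based start, 0-based exclusive end) of maximal non-delim runs
def pvToks : List Char → Nat → List (Nat × Nat)
  | [], _ => []
  | c :: rest, i =>
    if pvDelim c then pvToks rest (i + 1)
    else
      let t := rest.takeWhile (fun d => !pvDelim d)
      (i, i + t.length + 1) :: pvToks (rest.dropWhile (fun d => !pvDelim d)) (i + t.length + 1)
termination_by cs _ => cs.length
decreasing_by
  all_goals simp [Nat.lt_succ_of_le (List.length_dropWhile_le _ _)]

-- write the tokens into the two fixed arrays (1-based start, 1-based inclusive end)
def pvWrite (d0 d1 : List Int) (nsub : Int) : List (Nat × Nat) → Int × List (List Int)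
  | [] => (nsub, [d0, d1])
  | (a, b) :: ts =>
    pvWrite (d0.set nsub.toNat ((a : Int) + 1)) (d1.set nsub.toNat (b : Int)) (nsub + 1) ts

-- l.dropWhile p is l.drop of the takeWhile length
theorem pvDropWhile_eq {α : Type} (p : α → Bool) (l : List α) :
    l.dropWhile p = l.drop (l.takeWhile p).length := by
  induction l with
  | nil => simp
  | cons x xs ih => by_cases h : p x <;> simp [List.dropWhile, List.takeWhile, h, ih]

-- the first element surviving dropWhile fails the predicate
theorem pvDropWhile_head {α : Type} (p : α → Bool) (l : List α) (x : α) (xs : List α)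
    (h : l.dropWhile p = x :: xs) : p x = false := by
  induction l with
  | nil => simp at h
  | cons y ys ih =>
    by_cases hy : p y
    · exact ih (by simpa [List.dropWhile, hy] using h)
    · simp [List.dropWhile, hy] at h
      simpa [h.1] using hy

-- every element of takeWhile satisfies the predicate
theorem pvTakeWhile_mem {α : Type} (p : α → Bool) (l : List α) (a : α)
    (h : a ∈ l.takeWhile p) : p a = true := by
  induction l with
  | nil => simp at h
  | cons x xs ih =>
    by_cases hx : p x
    · rcases (by simpa [List.takeWhile, hx] using h : a = x ∨ a ∈ xs.takeWhile p) with rfl | hm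
      · exact hx
      · exact ih hm
    · simp [List.takeWhile, hx] at h

-- in-range array access is list indexing
theorem pvCharAt_eq (cs : List Char) (p : Nat) (hp : p < cs.length) :
    pvCharAt cs.toArray (((p : Nat) : Int) + 1 - 1) = cs[p] := by
  have h1 : ((p : Int) + 1 - 1) = ((p : Nat) : Int) := by omega
  rw [h1]
  simp [pvCharAt, hp]

-- ----- A-side: the inner loop returns 1 + (1-based position past the current run) -----
theorem pvInnerA_eq_aux (n : Nat) : ∀ (cs : List Char) (p : Nat), cs.length - p = n → p ≤ cs.length →
    pvInnerA cs.toArray (cs.length : Int) ((p : Nat) : Int) =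
      ((p : Int) + 1) + ((cs.drop p).takeWhile (fun d => !pvDelim d)).length := by
  induction n with
  | zero =>
    intro cs p hn hp
    have hp' : p = cs.length := by omega
    rw [pvInnerA]
    rw [dif_pos (by omega)]
    subst hp'
    simp
  | succ n ih =>
    intro cs p hn hp
    have hplt : p < cs.length := by omega
    rw [pvInnerA]
    rw [dif_neg (by omega)]
    rw [pvCharAt_eq cs p hplt]
    have hdrop : cs.drop p = cs[p] :: cs.drop (p + 1) := List.drop_eq_getElem_cons hplt
    by_cases hd : pvDelim cs[p]
    · -- delimiter: inner loop stops at once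
      rw [if_neg (by simp [pvDelim] at hd; tauto)]
      rw [hdrop]
      simp [List.takeWhile, hd]
    · -- non-delimiter: one more step
      rw [if_pos (by simp [pvDelim] at hd; tauto)]
      have hcast : ((p : Int) + 1) = (((p + 1 : Nat)) : Int) := by push_cast; ring
      rw [hcast, ih cs (p + 1) (by omega) (by omega)]
      rw [hdrop]
      simp only [List.takeWhile_cons, hd, Bool.not_false, if_true, List.length_cons]
      push_cast
      ring

theorem pvInnerA_eq (cs : List Char) (p : Nat) (hp : p ≤ cs.length) :
    pvInnerA cs.toArray (cs.length : Int) ((p : Nat) : Int) =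
      ((p : Int) + 1) + ((cs.drop p).takeWhile (fun d => !pvDelim d)).length :=
  pvInnerA_eq_aux (cs.length - p) cs p rfl hp

-- ----- A-side: the outer loop writes exactly the tokens from position p on -----
theorem pvOuterA_eq_aux (n : Nat) : ∀ (cs : List Char) (p : Nat), cs.length - p = n →
    ∀ (d0 d1 : List Int) (nsub : Int),
    pvOuterA cs.toArray (cs.length : Int) d0 d1 nsub ((p : Nat) : Int) =
      pvWrite d0 d1 nsub (pvToks (cs.drop p) p) := by
  induction n using Nat.strong_induction_on with
  | _ n ih =>
    intro cs p hn d0 d1 nsub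
    by_cases hp : p < cs.length
    case neg =>
      rw [pvOuterA, dif_pos (by omega)]
      rw [List.drop_eq_nil_of_le (by omega)]
      simp [pvToks, pvWrite]
    case pos =>
      rw [pvOuterA, dif_neg (by omega)]
      rw [pvCharAt_eq cs p hp]
      have hdrop : cs.drop p = cs[p] :: cs.drop (p + 1) := List.drop_eq_getElem_cons hp
      by_cases hd : pvDelim cs[p]
      · -- delimiter at p: skip it
        rw [if_pos (by simp [pvDelim] at hd; tauto)]
        have hcast : ((p : Int) + 1) = (((p + 1 : Nat)) : Int) := by push_cast; ring
        rw [hcast, ih (cs.length - (p + 1)) (by omega) cs (p + 1) rfl]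
        rw [hdrop, pvToks, if_pos hd]
      · -- token starting at p
        rw [if_neg (by simp [pvDelim] at hd; tauto)]
        set L := ((cs.drop (p + 1)).takeWhile (fun d => !pvDelim d)).length with hLdef
        have hLle : L ≤ cs.length - (p + 1) := by
          have := (List.takeWhile_prefix (l := cs.drop (p + 1))
            (p := fun d => !pvDelim d)).length_le
          simp only [List.length_drop] at this
          omega
        have hcast : ((p : Int) + 1) = (((p + 1 : Nat)) : Int) := by push_cast; ring
        have hk : pvInnerA cs.toArray (cs.length : Int) ((p : Int) + 1) = (p : Int) + 2 + L := by
          rw [hcast, pvInnerA_eq cs (p + 1) (by omega)]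
          push_cast; ring
        rw [hk]
        -- the right-hand side: one token (p, p+L+1) then the rest
        rw [hdrop, pvToks, if_neg (by simp [hd])]
        simp only [← hLdef, pvWrite]
        have e0 : (nsub + 1 - 1).toNat = nsub.toNat := by omega
        have e1 : ((p : Int) + 2 + (L : Int) - 1) = (((p + L + 1 : Nat)) : Int) := by push_cast; ring
        have e2 : ((p : Int) + 1) = (((p : Nat)) : Int) + 1 := rfl
        -- what remains after the token
        have hrest : (cs.drop (p + 1)).dropWhile (fun d => !pvDelim d) = cs.drop (p + 1 + L) := by
          rw [pvDropWhile_eq, ← hLdef, List.drop_drop]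
        by_cases hklt : (p : Int) + 2 + L < (cs.length : Int)
        case pos =>
          rw [dif_pos hklt]
          have hplt : p + 1 + L < cs.length := by push_cast at hklt; omega
          have hkcast : ((p : Int) + 2 + L) = (((p + L + 2 : Nat)) : Int) := by push_cast; ring
          rw [e0, e1, hkcast, ih (cs.length - (p + L + 2)) (by omega) cs (p + L + 2) rfl]
          -- the char at p+1+L is a delimiter, so the tail tokens agree
          have hdel : pvDelim cs[p + 1 + L] = true := by
            have h2 : cs.drop (p + 1 + L) = cs[p + 1 + L] :: cs.drop (p + 1 + L + 1) :=
              List.drop_eq_getElem_cons hplt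
            have := pvDropWhile_head (fun d => !pvDelim d) (cs.drop (p + 1)) cs[p + 1 + L]
              (cs.drop (p + 1 + L + 1)) (by rw [hrest, h2])
            simpa using this
          rw [hrest, List.drop_eq_getElem_cons hplt, pvToks, if_pos hdel]
          have : p + 1 + L + 1 = p + L + 2 := by omega
          rw [this]
        case neg =>
          rw [dif_neg hklt]
          have hge : cs.length ≤ p + L + 2 := by push_cast at hklt; omega
          have htail : pvToks ((cs.drop (p + 1)).dropWhile (fun d => !pvDelim d)) (p + L + 1) = [] := by
            rw [hrest]
            by_cases hend : p + 1 + L < cs.length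
            · have hplt : p + 1 + L = cs.length - 1 := by omega
              have hdel : pvDelim cs[p + 1 + L] = true := by
                have h2 : cs.drop (p + 1 + L) = cs[p + 1 + L] :: cs.drop (p + 1 + L + 1) :=
                  List.drop_eq_getElem_cons hend
                have := pvDropWhile_head (fun d => !pvDelim d) (cs.drop (p + 1)) cs[p + 1 + L]
                  (cs.drop (p + 1 + L + 1)) (by rw [hrest, h2])
                simpa using this
              rw [List.drop_eq_getElem_cons hend, pvToks, if_pos hdel,
                List.drop_eq_nil_of_le (by omega), pvToks]
            · rw [List.drop_eq_nil_of_le (by omega), pvToks]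
          rw [htail, e0, e1, pvWrite]

theorem pvOuterA_eq (cs : List Char) (p : Nat) (d0 d1 : List Int) (nsub : Int) :
    pvOuterA cs.toArray (cs.length : Int) d0 d1 nsub ((p : Nat) : Int) =
      pvWrite d0 d1 nsub (pvToks (cs.drop p) p) :=
  pvOuterA_eq_aux (cs.length - p) cs p rfl d0 d1 nsub

-- ----- B-side: running the fold through one in-token run of characters -----
theorem pvFoldB_run (u : List Char) (hu : ∀ c ∈ u, pvDelim c = false) (v : List Char)
    (q nsub : Int) (d0 d1 : List Int) :
    (u ++ v).foldl pvStepB (q, nsub, d0, d1, true) =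
      v.foldl pvStepB (q + u.length, nsub, d0,
        (if u.isEmpty then d1 else d1.set (nsub - 1).toNat (q + u.length)), true) := by
  induction u generalizing q d1 with
  | nil => simp
  | cons c u' ih =>
    have hc : c ≠ ' ' ∧ c ≠ '=' := by
      have := hu c (by simp)
      simp [pvDelim] at this
      tauto
    rw [List.cons_append, List.foldl_cons]
    have hstep : pvStepB (q, nsub, d0, d1, true) c
        = (q + 1, nsub, d0, d1.set (nsub - 1).toNat (q + 1), true) := by
      simp [pvStepB, hc.1, hc.2]
    rw [hstep, ih (fun c hm => hu c (by simp [hm]))]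
    by_cases he : u'.isEmpty
    · have : u' = [] := by simpa [List.isEmpty_iff] using he
      subst this
      simp
    · rw [if_neg he, if_neg (by simp : ¬((c :: u').isEmpty = true)), List.set_set]
      have : q + 1 + (u'.length : Int) = q + ((c :: u').length : Int) := by
        simp [List.length_cons]; ring
      rw [this]

-- ----- B-side: the fold from an out-of-token state writes exactly the tokens -----
theorem pvFoldB_eq (n : Nat) : ∀ (xs : List Char), xs.length = n →
    ∀ (q : Nat) (nsub : Int) (d0 d1 : List Int),
    (fun st : Int × Int × List Int × List Int × Bool => (st.2.1, [st.2.2.1, st.2.2.2.1]))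
      (xs.foldl pvStepB (((q : Nat) : Int), nsub, d0, d1, false)) =
      pvWrite d0 d1 nsub (pvToks xs q) := by
  induction n using Nat.strong_induction_on with
  | _ n ih =>
    intro xs hxs q nsub d0 d1
    match xs, hxs with
    | [], _ => simp [pvToks, pvWrite]
    | c :: rest, hxs =>
      rw [List.foldl_cons]
      by_cases hd : pvDelim c
      · have hc : c = ' ' ∨ c = '=' := by simpa [pvDelim] using hd
        have hstep : pvStepB (((q : Nat) : Int), nsub, d0, d1, false) c
            = (((q : Nat) : Int) + 1, nsub, d0, d1, false) := by
          rcases hc with rfl | rfl <;> simp [pvStepB]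
        have hcast : ((q : Int) + 1) = (((q + 1 : Nat)) : Int) := by push_cast; ring
        have hxs' : rest.length + 1 = n := by simpa using hxs
        rw [hstep, hcast, ih rest.length (by omega) rest rfl (q + 1)]
        rw [pvToks, if_pos hd]
      · have hc : ¬(c = ' ' ∨ c = '=') := by simp [pvDelim] at hd; tauto
        have hxs' : rest.length + 1 = n := by simpa using hxs
        have hstep : pvStepB (((q : Nat) : Int), nsub, d0, d1, false) c
            = (((q : Nat) : Int) + 1, nsub + 1, d0.set nsub.toNat ((q : Int) + 1),
               d1.set nsub.toNat ((q : Int) + 1), true) := by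
          simp [pvStepB, hc]
        rw [hstep]
        set t := rest.takeWhile (fun d => !pvDelim d) with htdef
        have hsplit : rest = t ++ rest.dropWhile (fun d => !pvDelim d) :=
          (List.takeWhile_append_dropWhile).symm
        have hrun := pvFoldB_run t
          (fun d hm => by simpa using pvTakeWhile_mem (fun d => !pvDelim d) rest d hm)
          (rest.dropWhile (fun d => !pvDelim d))
          ((q : Int) + 1) (nsub + 1) (d0.set nsub.toNat ((q : Int) + 1))
          (d1.set nsub.toNat ((q : Int) + 1))
        rw [← hsplit] at hrun
        rw [hrun]
        have hd1 : (if t.isEmpty then d1.set nsub.toNat ((q : Int) + 1)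
              else (d1.set nsub.toNat ((q : Int) + 1)).set (nsub + 1 - 1).toNat ((q : Int) + 1 + t.length))
            = d1.set nsub.toNat ((q : Int) + 1 + t.length) := by
          by_cases he : t.isEmpty
          · have : t = [] := by simpa [List.isEmpty_iff] using he
            simp [this]
          · have e0 : (nsub + 1 - 1) = nsub := by ring
            simp [he, e0, List.set_set]
        rw [hd1]
        -- right-hand side: write the token (q, q + t.length + 1)
        rw [pvToks, if_neg (by simp [hd]), ← htdef, pvWrite]
        have ecast : (((q + t.length + 1 : Nat)) : Int) = (q : Int) + 1 + t.length := by
          push_cast; ring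
        rw [ecast]
        rcases hR : rest.dropWhile (fun d => !pvDelim d) with _ | ⟨cH, r₂⟩
        · simp [pvToks, pvWrite]
        · rw [hR] at hsplit
          have hdelH : pvDelim cH = true := by
            simpa using pvDropWhile_head (fun d => !pvDelim d) rest cH r₂ hR
          have hlen2 : r₂.length < n := by
            have : rest.length = t.length + (r₂.length + 1) := by
              conv_lhs => rw [hsplit]
              simp
            omega
          rw [List.foldl_cons]
          have hstep2 : pvStepB ((q : Int) + 1 + t.length, nsub + 1, d0.set nsub.toNat ((q : Int) + 1),
                d1.set nsub.toNat ((q : Int) + 1 + t.length), true) cH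
              = ((q : Int) + 1 + t.length + 1, nsub + 1, d0.set nsub.toNat ((q : Int) + 1),
                d1.set nsub.toNat ((q : Int) + 1 + t.length), false) := by
            have : cH = ' ' ∨ cH = '=' := by simpa [pvDelim] using hdelH
            rcases this with rfl | rfl <;> simp [pvStepB]
          rw [hstep2]
          have hcast2 : ((q : Int) + 1 + t.length + 1) = (((q + t.length + 2 : Nat)) : Int) := by
            push_cast; ring
          rw [hcast2, ih r₂.length hlen2 r₂ rfl (q + t.length + 2)]
          rw [pvToks, if_pos hdelH]

-- ===== VERDICT (by name: the statement is the Claim_ definition above) =====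
theorem mio_spl_spec : Claim_equal_mio_spl := by
  intro length s _dom _pre
  unfold Spec_mio_spl mio_spl mio_spl_alt
  by_cases hle : length ≤ 0
  · -- length <= 0: A's loop exits at once, B's field is empty
    have hA : pvOuterA (pvPrepA length s).toArray length (List.replicate 100 (-1)) (List.replicate 100 (-1)) 0 0
        = ((0 : Int), [List.replicate 100 (-1), List.replicate 100 (-1)]) := by
      unfold pvOuterA
      simp only []
      rw [dif_pos (by omega)]
    have hB : pvPrepB length s = [] := by
      unfold pvPrepB
      simp [max_eq_right hle, PySem.List.slice_to]
    rw [hA, hB]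
    simp
  · -- length > 0: both fields coincide and have length = length.toNat
    have hpos : 0 < length := by omega
    have hmax : max length 0 = length := by omega
    have hcs : pvPrepB length s = pvPrepA length s := by
      unfold pvPrepA pvPrepB; rw [hmax]
    have hlen : ((pvPrepA length s).length : Int) = length := by
      unfold pvPrepA
      simp only [PySem.List.slice_to s.toList (le_of_lt hpos), List.length_append,
        List.length_take, List.length_replicate]
      omega
    rw [hcs]
    have hO := pvOuterA_eq (pvPrepA length s) 0 (List.replicate 100 (-1)) (List.replicate 100 (-1)) 0
    rw [hlen] at hO
    have hF := pvFoldB_eq (pvPrepA length s).length (pvPrepA length s) rfl 0 0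
      (List.replicate 100 (-1)) (List.replicate 100 (-1))
    simp only [List.drop_zero, Nat.cast_zero] at hO hF
    rw [hO, ← hF]
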